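-- pv_equiv track=rewrite | github.com/Dagothig/IFT2245-TP2 | test.py | exp_concurrent
-- ===== SOURCE A (Python) =====
-- def exp(out, str):
--     if out != None and out[:len(str)] == str:
--         return out[len(str):]
--
-- def exp_concurrent(out, strs):
--     if len(strs) == 0:
--         return out
--     for str in strs:
--         found = exp(out, str)
--         if found != None:
--             strs.remove(str)
--             return exp_concurrent(found, strs)
-- ===== SOURCE B (Python) =====
-- def exp_concurrent(out, strs):
--     # Iterative rewrite: explicit while loop consuming prefixes; mutates strs
--     # in place (pop of the matched element) exactly like the original's remove.
--     while strs:
--         for i, s in enumerate(strs):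
--             if out.startswith(s):
--                 strs.pop(i)
--                 out = out[len(s):]
--                 break
--         else:
--             return None
--     return out
-- ===== Notes on version B (the rewrite author's own statement) =====
-- stated objective: idiomatic
-- what changed: Replaced the recursive helper-based greedy matcher by an explicit while loop that scans for the first prefix with str.startswith and pops it by index, with no recursion and no separate exp helper.
import Mathlib
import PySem

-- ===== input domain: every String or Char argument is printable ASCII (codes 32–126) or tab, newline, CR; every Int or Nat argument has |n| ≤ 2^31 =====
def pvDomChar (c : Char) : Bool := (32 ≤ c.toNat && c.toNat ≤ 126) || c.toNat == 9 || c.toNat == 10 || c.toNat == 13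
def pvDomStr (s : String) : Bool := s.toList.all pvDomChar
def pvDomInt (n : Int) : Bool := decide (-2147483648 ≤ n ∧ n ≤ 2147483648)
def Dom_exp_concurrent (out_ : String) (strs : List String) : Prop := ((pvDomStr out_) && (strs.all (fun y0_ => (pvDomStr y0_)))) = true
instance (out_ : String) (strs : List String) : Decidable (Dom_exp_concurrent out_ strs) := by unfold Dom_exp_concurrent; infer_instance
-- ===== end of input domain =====

-- B is an iterative while-loop rewrite of A's recursion (same cost, no recursion, no helper).
-- Both Pythons mutate strs in place identically (first prefix match removed); the equivalence proved is about the return value.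

-- ===== PORT A =====
-- exp(out, str): 'out != None' always holds at every call site reached from a String out_
def pvExp (out : String) (s : String) : Option String :=
  if PySem.Str.slice out none (some (s.length : Int)) = s then
    some (PySem.Str.slice out (some (s.length : Int)) none)
  else none

def exp_concurrent (out_ : String) (strs : List String) : Option String :=
  if strs.length = 0 then some out_
  else
    -- for str in strs: found = exp(out, str); if found != None: strs.remove(str); return exp_concurrent(found, strs)
    match hf : strs.find? (fun s => (pvExp out_ s).isSome) with
    | none => none
    | some s =>
      match pvExp out_ s with
      | none => none  -- unreachable: find? guarantees isSome
      | some found =>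
        match hr : PySem.List.remove? strs s with
        | none => none  -- unreachable: s ∈ strs
        | some rest => exp_concurrent found rest
termination_by strs.length
decreasing_by
  have hmem : s ∈ strs := List.mem_of_find?_eq_some hf
  rw [PySem.List.remove?_eq_some_erase strs s hmem] at hr
  obtain rfl : rest = strs.erase s := (Option.some.injEq _ _).mp hr.symm
  have := List.length_erase_of_mem hmem
  have hpos : 0 < strs.length := List.length_pos_of_mem hmem
  omega

-- ===== PORT B =====
-- inner for-loop with break/else: find the first s with out.startswith(s) and pop it by index
def pvScan (out : String) (l : List String) : Option (String × List String) :=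
  match l with
  | [] => none
  | s :: t =>
    if PySem.Str.startswith out s then some (s, t)
    else (pvScan out t).map (fun p => (p.1, s :: p.2))

theorem pvScan_length {out : String} : ∀ {l : List String} {s : String} {rest : List String},
    pvScan out l = some (s, rest) → rest.length + 1 = l.length := by
  intro l
  induction l with
  | nil => intro s rest h; simp [pvScan] at h
  | cons a t ih =>
    intro s rest h
    simp only [pvScan] at h
    split at h
    · obtain ⟨rfl, rfl⟩ : a = s ∧ t = rest := by simpa using h
      simp
    · rw [Option.map_eq_some_iff] at h
      obtain ⟨⟨p1, p2⟩, hp, hpe⟩ := h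
      have := ih hp
      obtain ⟨rfl, rfl⟩ : p1 = s ∧ a :: p2 = rest := by simpa using hpe
      simp
      omega

def exp_concurrent_alt (out_ : String) (strs : List String) : Option String :=
  if strs.isEmpty then some out_
  else
    match hs : pvScan out_ strs with
    | none => none
    | some (s, rest) =>
      exp_concurrent_alt (PySem.Str.slice out_ (some (s.length : Int)) none) rest
termination_by strs.length
decreasing_by
  have := pvScan_length hs
  omega

-- ===== PRECONDITION & SPEC =====
def Spec_exp_concurrent (out_ : String) (strs : List String) (out : Option String) : Prop := out = exp_concurrent_alt out_ strs
instance (out_ : String) (strs : List String) (out : Option String) : Decidable (Spec_exp_concurrent out_ strs out) := by unfold Spec_exp_concurrent; infer_instance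

-- ===== CLAIM (what is proved, stated in full; the proofs are below) =====
def Claim_equal_exp_concurrent : Prop := ∀ (out_ : String) (strs : List String), Dom_exp_concurrent out_ strs → Spec_exp_concurrent out_ strs (exp_concurrent out_ strs)

-- ===== LEMMAS AND PROOFS =====

-- A's slice-compare prefix test agrees with B's startswith
theorem pvSliceCond_iff (out s : String) :
    PySem.Str.slice out none (some (s.length : Int)) = s ↔ PySem.Str.startswith out s = true := by
  rw [PySem.Str.startswith_eq, PySem.Chars.startswith_iff, List.prefix_iff_eq_take,
      ← String.toList_inj, PySem.Str.toList_slice]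
  have hl : (s.length : Int) = (s.toList.length : Int) := by simp
  rw [hl]
  have hs : PySem.Chars.slice out.toList none (some (s.toList.length : Int))
      = out.toList.take s.toList.length := PySem.List.slice_to_natCast _ _
  rw [hs]
  exact eq_comm

theorem pvExp_eq (out s : String) :
    pvExp out s = if PySem.Str.startswith out s then
      some (PySem.Str.slice out (some (s.length : Int)) none) else none := by
  unfold pvExp
  by_cases h : PySem.Str.startswith out s = true
  · rw [if_pos ((pvSliceCond_iff out s).mpr h), if_pos h]
  · rw [if_neg (fun hc => h ((pvSliceCond_iff out s).mp hc)), if_neg h]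

-- B's scan returns the first startswith match together with the list with it erased
theorem pvScan_eq_find (out : String) (l : List String) :
    pvScan out l = (l.find? (fun s => PySem.Str.startswith out s)).map (fun s => (s, l.erase s)) := by
  induction l with
  | nil => rfl
  | cons a t ih =>
    by_cases h : PySem.Str.startswith out a = true
    · rw [List.find?_cons_of_pos h]
      simp only [pvScan, if_pos h, Option.map_some, List.erase_cons_head]
    · rw [List.find?_cons_of_neg (by simpa using h)]
      simp only [pvScan, if_neg h, ih]
      cases hf : t.find? (fun s => PySem.Str.startswith out s) with
      | none => simp
      | some s =>
        have hs : PySem.Str.startswith out s = true := by simpa using List.find?_some hf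
        have hne : a ≠ s := fun e => h (e ▸ hs)
        simp [List.erase_cons, hne]

theorem eq_aux : ∀ (n : Nat) (out_ : String) (strs : List String), strs.length ≤ n →
    exp_concurrent out_ strs = exp_concurrent_alt out_ strs := by
  intro n
  induction n with
  | zero =>
    intro out strs h
    obtain rfl : strs = [] := List.eq_nil_of_length_eq_zero (Nat.le_zero.mp h)
    rw [exp_concurrent.eq_def, exp_concurrent_alt.eq_def]
    simp
  | succ n ih =>
    intro out strs hlen
    rcases strs with _ | ⟨a, t⟩
    · rw [exp_concurrent.eq_def, exp_concurrent_alt.eq_def]; simp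
    · have hpred : (fun s => (pvExp out s).isSome) = (fun s => PySem.Str.startswith out s) := by
        funext s
        rw [pvExp_eq, PySem.Str.startswith_eq]
        by_cases h : PySem.Chars.startswith out.toList s.toList = true <;> simp [h]
      rw [exp_concurrent.eq_def, exp_concurrent_alt.eq_def, hpred, pvScan_eq_find]
      simp only [List.length_cons, List.isEmpty_cons, Nat.succ_ne_zero, if_false,
        Bool.false_eq_true]
      cases hfind : (a :: t).find? (fun s => PySem.Str.startswith out s) with
      | none => simp
      | some s =>
        have hsw : PySem.Str.startswith out s = true := by simpa using List.find?_some hfind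
        have hmem : s ∈ a :: t := List.mem_of_find?_eq_some hfind
        simp only [Option.map_some, pvExp_eq, hsw, if_true]
        have hle : ((a :: t).erase s).length ≤ n := by
          have := List.length_erase_of_mem hmem
          simp only [List.length_cons] at hlen this
          omega
        split
        · next hr =>
            rw [PySem.List.remove?_eq_some_erase _ s hmem] at hr
            simp at hr
        · next rest hr =>
            rw [PySem.List.remove?_eq_some_erase _ s hmem] at hr
            obtain rfl : rest = (a :: t).erase s := by simpa using hr.symm
            exact ih _ _ hle

-- ===== VERDICT (by name: the statement is the Claim_ definition above) =====
theorem exp_concurrent_spec : Claim_equal_exp_concurrent := by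
  intro out_ strs _
  unfold Spec_exp_concurrent
  exact eq_aux strs.length out_ strs le_rfl
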